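-- pv_equiv track=rewrite | github.com/songzy12/CodeForces | Round/2025/1043/A.py | compute_result
-- ===== SOURCE A (Python) =====
-- from collections import deque
--
-- def compute_result(a, b, c):
--
--     res = deque(a)
--     for i, person in enumerate(c):
--         if person == 'V':
--             res.appendleft(b[i])
--         else:
--             res.append(b[i])
--     return ''.join(res)
-- ===== SOURCE B (Python) =====
-- def compute_result(a, b, c):
--     n = len(c)
--     front = ''.join(b[i] for i in range(n - 1, -1, -1) if c[i] == 'V')
--     back = ''.join(b[i] for i in range(n) if c[i] != 'V')
--     return front + a + back
-- ===== Notes on version B (the rewrite author's own statement) =====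
-- stated objective: alternative
-- what changed: B abandons the incremental front/back routing entirely: it makes two independent staged scans over the indices of c -- a backward index scan (range(n-1,-1,-1)) selecting the 'V' characters of b, and a forward filtered scan selecting the rest -- and concatenates front + a + back; no deque, no accumulator pair, no per-character routing pass.
import Mathlib
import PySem

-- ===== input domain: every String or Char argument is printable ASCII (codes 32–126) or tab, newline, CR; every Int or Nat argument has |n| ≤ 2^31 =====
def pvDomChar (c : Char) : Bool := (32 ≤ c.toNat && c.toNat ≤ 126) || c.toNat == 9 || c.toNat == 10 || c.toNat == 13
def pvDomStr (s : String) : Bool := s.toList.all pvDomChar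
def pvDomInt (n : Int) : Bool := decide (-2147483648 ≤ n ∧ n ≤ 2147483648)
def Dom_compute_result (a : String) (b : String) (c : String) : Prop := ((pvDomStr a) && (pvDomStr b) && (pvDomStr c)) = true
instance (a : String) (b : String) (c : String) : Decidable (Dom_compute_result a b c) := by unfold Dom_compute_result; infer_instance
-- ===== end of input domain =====

-- B replaces A's incremental deque routing by two independent staged scans: a backward
-- index scan collecting the 'V' characters of b and a forward scan collecting the rest,
-- assembled as front + a + back (objective: alternative, same O(n) cost).

-- ===== PORT A =====
-- res = deque(a); for i, person in enumerate(c): appendleft/append b[i]; ''.join(res)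
-- b[i] is ported as pyGetD; Pre_ guarantees the index is in range (else Python raises).
def compute_result (a : String) (b : String) (c : String) : String :=
  String.ofList ((PySem.List.enumerate c.toList 0).foldl
    (fun res ip =>
      if ip.2 = 'V' then PySem.List.pyGetD b.toList ip.1 ' ' :: res
      else res ++ [PySem.List.pyGetD b.toList ip.1 ' ']) a.toList)

-- ===== PORT B =====
-- n = len(c); front = join of b[i] for i in range(n-1,-1,-1) if c[i]=='V';
-- back = join of b[i] for i in range(n) if c[i]!='V'; front + a + back.
def compute_result_alt (a : String) (b : String) (c : String) : String :=
  let n : Int := c.toList.length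
  let front := (PySem.List.pyRange (n - 1) (-1) (-1)).foldl
    (fun acc i => if PySem.List.pyGetD c.toList i ' ' = 'V'
                  then acc ++ [PySem.List.pyGetD b.toList i ' '] else acc) []
  let back := (PySem.List.pyRange 0 n 1).foldl
    (fun acc i => if ¬ PySem.List.pyGetD c.toList i ' ' = 'V'
                  then acc ++ [PySem.List.pyGetD b.toList i ' '] else acc) []
  String.ofList (front ++ a.toList ++ back)

-- ===== PRECONDITION & SPEC =====
-- A indexes b[i] for every i < len(c), so it raises IndexError when c is longer than b.
def Pre_compute_result (a : String) (b : String) (c : String) : Prop :=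
  c.toList.length ≤ b.toList.length
instance (a : String) (b : String) (c : String) : Decidable (Pre_compute_result a b c) := by
  unfold Pre_compute_result; infer_instance

def pvWitness_compute_result : String × String × String := ("x", "ab", "VK")

def Spec_compute_result (a : String) (b : String) (c : String) (out : String) : Prop :=
  out = compute_result_alt a b c
instance (a : String) (b : String) (c : String) (out : String) : Decidable (Spec_compute_result a b c out) := by
  unfold Spec_compute_result; infer_instance

-- ===== CLAIM (what is proved, stated in full; the proofs are below) =====
def Claim_equal_compute_result : Prop := ∀ (a : String) (b : String) (c : String), Dom_compute_result a b c → Pre_compute_result a b c → Spec_compute_result a b c (compute_result a b c)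

-- ===== LEMMAS AND PROOFS =====

-- A's deque fold over `enumerate c` starting at index n, with the deque written as
-- left.reverse ++ a ++ right, equals the pair-split fold over `(b.drop n).zip c`.
lemma pv_loop (bl : List Char) (al : List Char) :
    ∀ (cl : List Char) (n : Nat) (left right : List Char),
      n + cl.length ≤ bl.length →
      (PySem.List.enumerate cl (n : Int)).foldl
        (fun res ip =>
          if ip.2 = 'V' then PySem.List.pyGetD bl ip.1 ' ' :: res
          else res ++ [PySem.List.pyGetD bl ip.1 ' '])
        (left.reverse ++ al ++ right)
      = (fun lr : List Char × List Char => lr.1.reverse ++ al ++ lr.2)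
          (((bl.drop n).zip cl).foldl
            (fun lr p =>
              if p.2 = 'V' then (lr.1 ++ [p.1], lr.2) else (lr.1, lr.2 ++ [p.1]))
            (left, right)) := by
  intro cl
  induction cl with
  | nil => intro n left right _; simp [PySem.List.enumerate_nil]
  | cons ch cl ih =>
    intro n left right h
    have hn : n < bl.length := by simp at h; omega
    have hdrop : bl.drop n = bl[n] :: bl.drop (n + 1) := List.drop_eq_getElem_cons hn
    have hget : PySem.List.pyGetD bl ((n : Int)) ' ' = bl[n] := by
      simp [PySem.List.pyGetD_natCast, List.getD_eq_getElem?_getD, hn]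
    rw [PySem.List.enumerate_cons, hdrop]
    simp only [List.zip_cons_cons, List.foldl_cons]
    by_cases hch : ch = 'V'
    · have : bl[n] :: (left.reverse ++ al ++ right)
          = (left ++ [bl[n]]).reverse ++ al ++ right := by simp
      rw [hch]
      simp only [ite_true, hget, this]
      have hcast : ((n : Int) + 1) = ((n + 1 : Nat) : Int) := by push_cast; ring
      rw [hcast, ih (n + 1) (left ++ [bl[n]]) right (by simp at h ⊢; omega)]
    · have : (left.reverse ++ al ++ right) ++ [bl[n]]
          = left.reverse ++ al ++ (right ++ [bl[n]]) := by simp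
      simp only [if_neg hch, hget, this]
      have hcast : ((n : Int) + 1) = ((n + 1 : Nat) : Int) := by push_cast; ring
      rw [hcast, ih (n + 1) left (right ++ [bl[n]]) (by simp at h ⊢; omega)]

-- The pair-split fold is the pair of a filter-map and its complement.
lemma pv_split :
    ∀ (l : List (Char × Char)) (L R : List Char),
      l.foldl
        (fun lr p => if p.2 = 'V' then (lr.1 ++ [p.1], lr.2) else (lr.1, lr.2 ++ [p.1]))
        (L, R)
      = (L ++ (l.filter (fun p => decide (p.2 = 'V'))).map Prod.fst,
         R ++ (l.filter (fun p => !decide (p.2 = 'V'))).map Prod.fst) := by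
  intro l
  induction l with
  | nil => intro L R; simp
  | cons p l ih =>
    intro L R
    by_cases hp : p.2 = 'V' <;> simp [hp, ih]

-- zip of two lists with the second no longer than the first, as an indexed map.
lemma pv_zip_range :
    ∀ (cl bl : List Char), cl.length ≤ bl.length →
      bl.zip cl = (List.range cl.length).map (fun i => (bl.getD i ' ', cl.getD i ' ')) := by
  intro cl
  induction cl with
  | nil => intro bl _; simp
  | cons ch cl ih =>
    intro bl h
    cases bl with
    | nil => simp at h
    | cons x bl =>
      have h' : cl.length ≤ bl.length := by simpa using h
      simp [List.zip_cons_cons, List.range_succ_eq_map, List.map_map, ih bl h',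
        Function.comp_def]

-- Guarded collecting folds as filter-then-map (reversed-order and negated-guard forms).
lemma pv_collect_rev {α β : Type} (p : α → Prop) [DecidablePred p] (g : α → β) :
    ∀ (l : List α),
      l.foldr (fun x y => if p x then y ++ [g x] else y) []
      = ((l.filter (fun i => decide (p i))).map g).reverse := by
  intro l
  induction l with
  | nil => simp
  | cons x l ih =>
    by_cases hx : p x <;> simp [hx, ih]

lemma pv_collect_neg {α β : Type} (p : α → Prop) [DecidablePred p] (g : α → β) :
    ∀ (l : List α) (acc : List β),
      l.foldl (fun acc i => if p i then acc else acc ++ [g i]) acc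
      = acc ++ (l.filter (fun i => !decide (p i))).map g := by
  intro l
  induction l with
  | nil => intro acc; simp
  | cons x l ih =>
    intro acc
    by_cases hx : p x <;> simp [hx, ih]

-- ===== VERDICT (by name: the statement is the Claim_ definition above) =====
theorem compute_result_spec : Claim_equal_compute_result := by
  intro a b c _ hpre
  unfold Spec_compute_result compute_result compute_result_alt
  have hA := pv_loop b.toList a.toList c.toList 0 [] [] (by simpa using hpre)
  simp only [Nat.cast_zero, List.drop_zero, List.reverse_nil, List.nil_append,
    List.append_nil] at hA
  rw [hA, pv_split, pv_zip_range c.toList b.toList hpre]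
  -- normalise both sides to range-indexed filter/maps
  have hrev : PySem.List.pyRange ((c.length : Int) - 1) (-1) (-1)
      = (PySem.List.pyRange 0 (c.length : Int) 1).reverse := by
    have := PySem.List.pyRange_neg_one_eq_reverse ((c.length : Int) - 1) (-1)
    simpa using this
  simp [pv_collect_rev, pv_collect_neg, hrev, PySem.List.pyRange_zero_natCast,
    List.filter_map, List.map_map, Function.comp_def]
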